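-- pv_equiv track=rewrite | github.com/DaveSteadman/MiniAgentFramework | testcode/test_analyzer.py | _detect_planner_mode
-- ===== SOURCE A (Python) =====
-- def _detect_planner_mode(sections: dict[str, str]) -> str:
--     """Return 'LLM', 'FALLBACK', or 'UNKNOWN' based on planner TPS presence."""
--     for title, body in sections.items():
--         if "PLAN JSON" in title or "PRE-PROCESSING PLAN" in title:
--             if "Planner TPS:" in body:
--                 return "LLM"
--             if "Fallback" in body or "fallback" in body:
--                 return "FALLBACK"
--     # If a PLAN JSON section exists with no TPS line it's likely a fallback
--     for title in sections:
--         if "PLAN JSON" in title: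
--             return "FALLBACK"
--     return "UNKNOWN"
-- ===== SOURCE B (Python) =====
-- def _detect_planner_mode(sections: dict[str, str]) -> str:
--     """Return 'LLM', 'FALLBACK', or 'UNKNOWN' based on planner TPS presence."""
--     # Single pass: remember whether any "PLAN JSON" title was seen while
--     # checking each planner section's body, instead of a second scan.
--     plan_json_seen = False
--     for title, body in sections.items():
--         has_plan_json = "PLAN JSON" in title
--         plan_json_seen = plan_json_seen or has_plan_json
--         if has_plan_json or "PRE-PROCESSING PLAN" in title:
--             if "Planner TPS:" in body:
--                 return "LLM"
--             if "Fallback" in body or "fallback" in body: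
--                 return "FALLBACK"
--     return "FALLBACK" if plan_json_seen else "UNKNOWN"
-- ===== Notes on version B (the rewrite author's own statement) =====
-- stated objective: simpler
-- what changed: Replaces A's two separate scans (indicator scan, then a second whole-dict scan for a 'PLAN JSON' title) by one fused pass that carries a plan_json_seen flag, deciding FALLBACK vs UNKNOWN at the end.
import Mathlib
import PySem

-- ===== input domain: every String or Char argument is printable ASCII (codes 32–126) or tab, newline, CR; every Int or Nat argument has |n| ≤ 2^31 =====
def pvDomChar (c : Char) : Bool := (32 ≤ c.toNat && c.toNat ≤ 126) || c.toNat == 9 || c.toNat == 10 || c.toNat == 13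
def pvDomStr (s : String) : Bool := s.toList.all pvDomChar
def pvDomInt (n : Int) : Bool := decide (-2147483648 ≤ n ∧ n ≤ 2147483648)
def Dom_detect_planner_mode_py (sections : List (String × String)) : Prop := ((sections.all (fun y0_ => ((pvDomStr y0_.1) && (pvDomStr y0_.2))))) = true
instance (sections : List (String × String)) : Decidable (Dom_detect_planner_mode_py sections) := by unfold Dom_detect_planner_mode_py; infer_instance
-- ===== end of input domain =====

-- B fuses A's two scans into one pass carrying a plan_json_seen flag (objective: simpler).


-- ===== PORT A =====
-- first loop: may return early, else falls through
def pvLoop1 : List (String × String) → Option String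
  | [] => none
  | (title, body) :: rest =>
    if PySem.Str.isIn "PLAN JSON" title || PySem.Str.isIn "PRE-PROCESSING PLAN" title then
      if PySem.Str.isIn "Planner TPS:" body then some "LLM"
      else if PySem.Str.isIn "Fallback" body || PySem.Str.isIn "fallback" body then some "FALLBACK"
      else pvLoop1 rest
    else pvLoop1 rest

-- second loop over the titles, then the final return
def pvLoop2 : List (String × String) → String
  | [] => "UNKNOWN"
  | (title, _) :: rest => if PySem.Str.isIn "PLAN JSON" title then "FALLBACK" else pvLoop2 rest

def detect_planner_mode_py (sections : List (String × String)) : String :=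
  match pvLoop1 sections with
  | some r => r
  | none => pvLoop2 sections

-- ===== PORT B =====
def pvAltLoop : List (String × String) → Bool → String
  | [], seen => if seen then "FALLBACK" else "UNKNOWN"
  | (title, body) :: rest, seen =>
    let hasPlan := PySem.Str.isIn "PLAN JSON" title
    let seen' := seen || hasPlan
    if hasPlan || PySem.Str.isIn "PRE-PROCESSING PLAN" title then
      if PySem.Str.isIn "Planner TPS:" body then "LLM"
      else if PySem.Str.isIn "Fallback" body || PySem.Str.isIn "fallback" body then "FALLBACK"
      else pvAltLoop rest seen'
    else pvAltLoop rest seen'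

def detect_planner_mode_py_alt (sections : List (String × String)) : String :=
  pvAltLoop sections false

-- ===== PRECONDITION & SPEC =====
-- Pre_ excludes association lists with duplicate keys, which do not represent any Python dict
-- (sections is a dict[str, str] in A, so its keys are necessarily distinct).
def Pre_detect_planner_mode_py (sections : List (String × String)) : Prop :=
  (sections.map Prod.fst).Nodup
instance (sections : List (String × String)) : Decidable (Pre_detect_planner_mode_py sections) := by unfold Pre_detect_planner_mode_py; infer_instance

def pvWitness_detect_planner_mode_py : (List (String × String)) :=
  [("PLAN JSON", "Planner TPS: 3"), ("notes", "n/a")]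

def Spec_detect_planner_mode_py (sections : List (String × String)) (out : String) : Prop := out = detect_planner_mode_py_alt sections
instance (sections : List (String × String)) (out : String) : Decidable (Spec_detect_planner_mode_py sections out) := by unfold Spec_detect_planner_mode_py; infer_instance

-- ===== CLAIM (what is proved, stated in full; the proofs are below) =====
def Claim_equal_detect_planner_mode_py : Prop := ∀ (sections : List (String × String)), Dom_detect_planner_mode_py sections → Pre_detect_planner_mode_py sections → Spec_detect_planner_mode_py sections (detect_planner_mode_py sections)

-- ===== LEMMAS AND PROOFS =====

-- The fused loop equals: A's first loop if it returns, else FALLBACK if the flag is set,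
-- else A's second loop on the remaining list.
theorem pvAltLoop_eq (l : List (String × String)) : ∀ seen : Bool,
    pvAltLoop l seen =
      match pvLoop1 l with
      | some r => r
      | none => if seen then "FALLBACK" else pvLoop2 l := by
  induction l with
  | nil => intro seen; rfl
  | cons hd tl ih =>
    intro seen
    obtain ⟨t, b⟩ := hd
    simp only [pvAltLoop, pvLoop1, pvLoop2]
    by_cases h1 : PySem.Str.isIn "PLAN JSON" t = true <;>
      simp only [h1, Bool.true_or, Bool.false_or, Bool.or_true, Bool.or_false, if_true,
        Bool.not_eq_true] at * <;>
    · split_ifs with h2 h3 <;> simp only [ih] <;> cases seen <;>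
        cases hL : pvLoop1 tl <;> simp_all

-- ===== VERDICT (by name: the statement is the Claim_ definition above) =====
theorem detect_planner_mode_py_spec : Claim_equal_detect_planner_mode_py := by
  intro sections _ _
  unfold Spec_detect_planner_mode_py detect_planner_mode_py detect_planner_mode_py_alt
  rw [pvAltLoop_eq]
  cases h : pvLoop1 sections <;> simp
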